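-- pv_equiv track=rewrite | github.com/Kinetics20/Python_practice_sessions_05 | Unit_tests/codewars_functions_.py | high
-- ===== SOURCE A (Python) =====
-- def high(x):
--     alphabet_dict = {
--         'a': 1,
--         'b': 2,
--         'c': 3,
--         'd': 4,
--         'e': 5,
--         'f': 6,
--         'g': 7,
--         'h': 8,
--         'i': 9,
--         'j': 10,
--         'k': 11,
--         'l': 12,
--         'm': 13,
--         'n': 14,
--         'o': 15,
--         'p': 16,
--         'q': 17,
--         'r': 18,
--         's': 19,
--         't': 20,
--         'u': 21,
--         'v': 22,
--         'w': 23,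
--         'x': 24,
--         'y': 25,
--         'z': 26
--     }
--
--     return sum([alphabet_dict[letter] for letter in x if letter in alphabet_dict])
-- ===== SOURCE B (Python) =====
-- def high(x):
--     freq = {}
--     for ch in x:
--         freq[ch] = freq.get(ch, 0) + 1
--     total = 0
--     for ch, cnt in freq.items():
--         if 'a' <= ch <= 'z':
--             total += (ord(ch) - 96) * cnt
--     return total
-- ===== Notes on version B (the rewrite author's own statement) =====
-- stated objective: alternative
-- what changed: B replaces the dict-literal lookup comprehension by a one-pass frequency table over the string followed by a sum of position*count over the distinct characters, with the alphabet position computed arithmetically from the character code under a lowercase-letter range guard instead of a 26-entry dict.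
import Mathlib
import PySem

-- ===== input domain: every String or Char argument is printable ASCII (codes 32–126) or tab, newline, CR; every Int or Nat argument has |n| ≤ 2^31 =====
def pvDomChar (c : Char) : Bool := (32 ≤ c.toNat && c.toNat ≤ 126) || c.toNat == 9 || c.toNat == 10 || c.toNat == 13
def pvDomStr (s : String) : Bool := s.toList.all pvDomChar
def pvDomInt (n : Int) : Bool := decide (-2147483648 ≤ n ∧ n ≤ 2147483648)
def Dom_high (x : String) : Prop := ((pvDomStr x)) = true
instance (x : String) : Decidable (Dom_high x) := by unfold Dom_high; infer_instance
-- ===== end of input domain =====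

-- B builds a frequency table in one pass and sums position*count over distinct characters (alternative decomposition; same cost).

-- ===== PORT A =====
def highDict : PySem.Dict Char Int := PySem.Dict.ofList
  [('a', 1), ('b', 2), ('c', 3), ('d', 4), ('e', 5), ('f', 6), ('g', 7), ('h', 8),
   ('i', 9), ('j', 10), ('k', 11), ('l', 12), ('m', 13), ('n', 14), ('o', 15),
   ('p', 16), ('q', 17), ('r', 18), ('s', 19), ('t', 20), ('u', 21), ('v', 22),
   ('w', 23), ('x', 24), ('y', 25), ('z', 26)]

-- sum([alphabet_dict[letter] for letter in x if letter in alphabet_dict])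
def high (x : String) : Int :=
  ((x.toList.filter (fun c => highDict.contains c)).map
    (fun c => (highDict.get? c).getD 0)).sum

-- ===== PORT B =====
def high_alt (x : String) : Int :=
  -- freq = {}; for ch in x: freq[ch] = freq.get(ch, 0) + 1
  let freq : PySem.Dict Char Int :=
    x.toList.foldl (fun d c => d.insert c (d.getD c 0 + 1)) PySem.Dict.empty
  -- total = 0; for ch, cnt in freq.items(): if 'a' <= ch <= 'z': total += (ord(ch)-96)*cnt
  freq.items.foldl
    (fun acc p => if 'a' ≤ p.1 ∧ p.1 ≤ 'z' then acc + ((p.1.toNat : Int) - 96) * p.2 else acc) 0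

-- ===== PRECONDITION & SPEC =====
def Spec_high (x : String) (out : Int) : Prop := out = high_alt x
instance (x : String) (out : Int) : Decidable (Spec_high x out) := by unfold Spec_high; infer_instance

-- ===== CLAIM (what is proved, stated in full; the proofs are below) =====
def Claim_equal_high : Prop := ∀ (x : String), Dom_high x → Spec_high x (high x)

-- ===== LEMMAS AND PROOFS =====

/-- Per-character contribution shared by both sides. -/
def gContrib (c : Char) : Int := if 'a' ≤ c ∧ c ≤ 'z' then (c.toNat : Int) - 96 else 0

lemma pointwise_lt127 : ∀ n < 127,
    (if highDict.contains (Char.ofNat n) then (highDict.get? (Char.ofNat n)).getD 0 else 0)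
      = gContrib (Char.ofNat n) := by
  set_option maxRecDepth 40000 in decide

lemma pointwise (c : Char) (h : pvDomChar c = true) :
    (if highDict.contains c then (highDict.get? c).getD 0 else 0) = gContrib c := by
  have hlt : c.toNat < 127 := by
    simp only [pvDomChar, Bool.or_eq_true, Bool.and_eq_true, decide_eq_true_eq,
      beq_iff_eq] at h
    omega
  have := pointwise_lt127 c.toNat hlt
  rwa [Char.ofNat_toNat] at this

lemma sideA (l : List Char) (h : ∀ c ∈ l, pvDomChar c = true) :
    ((l.filter (fun c => highDict.contains c)).map (fun c => (highDict.get? c).getD 0)).sum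
      = (l.map gContrib).sum := by
  induction l with
  | nil => simp
  | cons c l ih =>
    have hc := pointwise c (h c (by simp))
    have ih' := ih (fun d hd => h d (by simp [hd]))
    by_cases hmem : highDict.contains c = true
    · simp [hmem, ih', ← hc]
    · simp [hmem, ih', ← hc]

lemma foldl_contrib (l : List (Char × Int)) (a : Int) :
    l.foldl (fun acc p => if 'a' ≤ p.1 ∧ p.1 ≤ 'z' then acc + ((p.1.toNat : Int) - 96) * p.2 else acc) a
      = a + (l.map (fun p => gContrib p.1 * p.2)).sum := by
  induction l generalizing a with
  | nil => simp
  | cons p l ih =>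
    simp only [List.foldl_cons, List.map_cons, List.sum_cons, ih]
    by_cases hp : 'a' ≤ p.1 ∧ p.1 ≤ 'z' <;> simp [gContrib, hp] <;> try ring

lemma sideB (l : List Char) :
    (List.foldl (fun d c => d.insert c (d.getD c 0 + 1)) PySem.Dict.empty l).items.foldl
      (fun acc p => if 'a' ≤ p.1 ∧ p.1 ≤ 'z' then acc + ((p.1.toNat : Int) - 96) * p.2 else acc) 0
      = (l.map gContrib).sum := by
  rw [PySem.Dict.foldl_insert_getD_add_one_eq_counter, foldl_contrib,
      PySem.Dict.items_counter]
  rw [List.map_map]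
  have hded : (PySem.Set.ofList l : List Char).Nodup := PySem.Set.nodup_ofList l
  have htf : (PySem.Set.ofList l : List Char).toFinset = l.toFinset := by
    apply Finset.ext
    intro a
    simp [PySem.Set.mem_ofList]
  calc (0 : Int) + (List.map ((fun p : Char × Int => gContrib p.1 * p.2) ∘ fun k => (k, (l.count k : Int)))
          (PySem.Set.ofList l)).sum
      = ((PySem.Set.ofList l : List Char).map (fun k => gContrib k * (l.count k : Int))).sum := by
        simp [Function.comp_def]
    _ = (PySem.Set.ofList l : List Char).toFinset.sum (fun k => gContrib k * (l.count k : Int)) := by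
        rw [List.sum_toFinset _ hded]
    _ = l.toFinset.sum (fun k => (l.count k) • gContrib k) := by
        rw [htf]; apply Finset.sum_congr rfl
        intro k _
        rw [mul_comm]
        simp
    _ = (l.map gContrib).sum := (Finset.sum_list_map_count l gContrib).symm

-- ===== VERDICT (by name: the statement is the Claim_ definition above) =====
theorem high_spec : Claim_equal_high := by
  intro x hx
  unfold Spec_high high high_alt
  have hall : ∀ c ∈ x.toList, pvDomChar c = true := by
    have := hx
    unfold Dom_high pvDomStr at this
    simpa [List.all_eq_true] using this
  rw [sideA x.toList hall, sideB]
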